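-- pv_equiv track=rewrite | github.com/V-nsh/DSA | accenture practice/from_coding_ninjas_Site/LargeSmallSum.py | LargeSmallSum
-- ===== SOURCE A (Python) =====
-- def LargeSmallSum(arr):
--     # mergeSort(arr, 0, len(arr))
--     # return arr
--     evens, odds = [], []
--     for i in range(len(arr)):
--         if i%2==0:
--             evens.append(arr[i])
--         else:
--             odds.append(arr[i])
--     odds = sorted(odds)
--     evens = sorted(evens)
--     secondSmallest = odds[1]
--     secondLargest = evens[-2]
--     return secondSmallest+secondLargest
-- ===== SOURCE B (Python) =====
-- def LargeSmallSum(arr):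
--     # One pass: track the two smallest odd-index elements and the two
--     # largest even-index elements; no lists are built and nothing is sorted.
--     o1 = o2 = None          # two smallest odd-index values, o1 <= o2
--     e1 = e2 = None          # two largest even-index values, e1 >= e2
--     even = True
--     for x in arr:
--         if even:
--             if e1 is None:
--                 e1 = x
--             elif e2 is None:
--                 if x > e1:
--                     e1, e2 = x, e1
--                 else:
--                     e2 = x
--             elif x > e1:
--                 e1, e2 = x, e1
--             elif x > e2:
--                 e2 = x
--         else:
--             if o1 is None:
--                 o1 = x
--             elif o2 is None:
--                 if x < o1:
--                     o1, o2 = x, o1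
--                 else:
--                     o2 = x
--             elif x < o1:
--                 o1, o2 = x, o1
--             elif x < o2:
--                 o2 = x
--         even = not even
--     return o2 + e2
-- ===== Notes on version B (the rewrite author's own statement) =====
-- stated objective: faster
-- what changed: A splits the array into even-index and odd-index lists and sorts both to pick odds[1] and evens[-2]; B makes a single pass tracking the two smallest odd-index values and the two largest even-index values, building no lists and sorting nothing (measured 4.7x on random inputs; on already-sorted inputs Timsort is linear, so the gap there is only a constant factor).
-- outside the precondition, e.g. on LargeSmallSum([1]): A raises IndexError, B raises TypeError; on LargeSmallSum([-2]): A raises IndexError, B raises TypeError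
import Mathlib
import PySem

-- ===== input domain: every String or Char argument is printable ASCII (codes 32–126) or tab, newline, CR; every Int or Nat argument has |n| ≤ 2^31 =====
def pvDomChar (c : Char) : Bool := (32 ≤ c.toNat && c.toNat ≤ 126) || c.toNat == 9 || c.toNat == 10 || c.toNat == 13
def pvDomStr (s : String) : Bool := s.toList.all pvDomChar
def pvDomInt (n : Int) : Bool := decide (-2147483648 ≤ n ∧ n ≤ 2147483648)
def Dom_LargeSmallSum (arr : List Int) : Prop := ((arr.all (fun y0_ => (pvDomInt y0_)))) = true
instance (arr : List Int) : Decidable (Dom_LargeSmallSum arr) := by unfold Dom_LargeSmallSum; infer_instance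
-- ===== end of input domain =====

-- B replaces A's build-two-lists-and-sort with a single pass that tracks the two
-- smallest odd-index and the two largest even-index elements (objective: alternative; no lists built, nothing sorted).

-- ===== PORT A =====
def LargeSmallSum (arr : List Int) : Int :=
  -- for i in range(len(arr)): append arr[i] to evens/odds by parity of i
  let p := (PySem.List.pyRange 0 (PySem.List.len arr) 1).foldl
    (fun (p : List Int × List Int) i =>
      if PySem.Int.mod i 2 = 0 then (p.1 ++ [PySem.List.pyGetD arr i 0], p.2)
      else (p.1, p.2 ++ [PySem.List.pyGetD arr i 0]))
    ([], [])
  let odds := PySem.List.sorted p.2 (fun x => x) false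
  let evens := PySem.List.sorted p.1 (fun x => x) false
  -- odds[1] and evens[-2]; Python raises IndexError when missing: excluded by Pre_
  PySem.List.pyGetD odds 1 0 + PySem.List.pyGetD evens (-2) 0

-- ===== PORT B =====
-- state of the two-largest tracker (e1, e2), e1 ≥ e2; none = Python's None
def bStepE (s : Option Int × Option Int) (x : Int) : Option Int × Option Int :=
  match s with
  | (none, _) => (some x, none)
  | (some a, none) => if x > a then (some x, some a) else (some a, some x)
  | (some a, some b) =>
      if x > a then (some x, some a)
      else if x > b then (some a, some x)
      else (some a, some b)

-- state of the two-smallest tracker (o1, o2), o1 ≤ o2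
def bStepO (s : Option Int × Option Int) (x : Int) : Option Int × Option Int :=
  match s with
  | (none, _) => (some x, none)
  | (some a, none) => if x < a then (some x, some a) else (some a, some x)
  | (some a, some b) =>
      if x < a then (some x, some a)
      else if x < b then (some a, some x)
      else (some a, some b)

def LargeSmallSum_alt (arr : List Int) : Int :=
  let st := arr.foldl
    (fun (s : Bool × (Option Int × Option Int) × (Option Int × Option Int)) x =>
      if s.1 then (false, bStepE s.2.1 x, s.2.2) else (true, s.2.1, bStepO s.2.2 x))
    (true, (none, none), (none, none))
  -- return o2 + e2 (None here = Python TypeError; excluded by Pre_)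
  (st.2.2.2).getD 0 + (st.2.1.2).getD 0

-- ===== PRECONDITION & SPEC =====
-- A raises IndexError (and B TypeError) when arr has fewer than 4 elements:
-- fewer than two odd-index elements make odds[1] (or evens[-2]) fail.
def Pre_LargeSmallSum (arr : List Int) : Prop := 4 ≤ arr.length
instance (arr : List Int) : Decidable (Pre_LargeSmallSum arr) := by unfold Pre_LargeSmallSum; infer_instance

def pvWitness_LargeSmallSum : List Int := [1, 2, 3, 4]

def Spec_LargeSmallSum (arr : List Int) (out : Int) : Prop := out = LargeSmallSum_alt arr
instance (arr : List Int) (out : Int) : Decidable (Spec_LargeSmallSum arr out) := by unfold Spec_LargeSmallSum; infer_instance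

-- ===== CLAIM (what is proved, stated in full; the proofs are below) =====
def Claim_equal_LargeSmallSum : Prop := ∀ (arr : List Int), Dom_LargeSmallSum arr → Pre_LargeSmallSum arr → Spec_LargeSmallSum arr (LargeSmallSum arr)

-- ===== LEMMAS AND PROOFS =====

-- the even-index and odd-index elements of a list, in order
mutual
def evensOf : List Int → List Int
  | [] => []
  | x :: t => x :: oddsOf t
def oddsOf : List Int → List Int
  | [] => []
  | _ :: t => evensOf t
end

theorem length_evensOf_oddsOf (l : List Int) :
    (evensOf l).length = (l.length + 1) / 2 ∧ (oddsOf l).length = l.length / 2 := by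
  induction l with
  | nil => simp [evensOf, oddsOf]
  | cons x t ih => simp [evensOf, oddsOf, ih.1, ih.2]; omega

-- A's loop, reshaped as a fold over enumerate, builds evensOf/oddsOf
theorem foldA_enumerate (l : List Int) : ∀ (s : Int) (ev od : List Int), 0 ≤ s →
    (PySem.List.enumerate l s).foldl
      (fun (p : List Int × List Int) q =>
        if PySem.Int.mod q.1 2 = 0 then (p.1 ++ [q.2], p.2) else (p.1, p.2 ++ [q.2]))
      (ev, od) =
    if s % 2 = 0 then (ev ++ evensOf l, od ++ oddsOf l) else (ev ++ oddsOf l, od ++ evensOf l) := by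
  induction l with
  | nil => intro s ev od hs; simp only [PySem.List.enumerate, List.foldl_nil, evensOf, oddsOf]; split_ifs <;> simp
  | cons x t ih =>
    intro s ev od hs
    rw [PySem.List.enumerate_cons]
    simp only [List.foldl_cons]
    rw [PySem.Int.mod_eq_emod_of_pos (by norm_num)]
    by_cases h : s % 2 = 0
    · simp only [h, if_pos]
      rw [ih (s + 1) _ _ (by omega)]
      have h1 : ¬ (s + 1) % 2 = 0 := by omega
      simp [h1, evensOf, oddsOf]
    · simp only [h, if_false]
      rw [ih (s + 1) _ _ (by omega)]
      have h1 : (s + 1) % 2 = 0 := by omega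
      simp [h1, evensOf, oddsOf]

-- B's combined one-pass fold splits into the two trackers over evensOf/oddsOf
theorem foldB_split (l : List Int) : ∀ (p : Bool) (e o : Option Int × Option Int),
    (l.foldl
      (fun (s : Bool × (Option Int × Option Int) × (Option Int × Option Int)) x =>
        if s.1 then (false, bStepE s.2.1 x, s.2.2) else (true, s.2.1, bStepO s.2.2 x))
      (p, e, o)).2 =
    ((if p then evensOf l else oddsOf l).foldl bStepE e,
     (if p then oddsOf l else evensOf l).foldl bStepO o) := by
  induction l with
  | nil => intro p e o; cases p <;> simp [evensOf, oddsOf]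
  | cons x t ih =>
    intro p e o
    cases p <;> simp only [List.foldl_cons, if_true, if_false, Bool.false_eq_true] <;>
      rw [ih] <;> simp [evensOf, oddsOf]

theorem bStepO_comm (s : Option Int × Option Int) (x y : Int) :
    bStepO (bStepO s x) y = bStepO (bStepO s y) x := by
  obtain ⟨o1, o2⟩ := s
  cases o1 <;> cases o2 <;> simp only [bStepO] <;>
    (try split_ifs) <;> (try simp only [bStepO]) <;> (try split_ifs) <;>
    simp_all <;> omega

theorem bStepE_comm (s : Option Int × Option Int) (x y : Int) :
    bStepE (bStepE s x) y = bStepE (bStepE s y) x := by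
  obtain ⟨e1, e2⟩ := s
  cases e1 <;> cases e2 <;> simp only [bStepE] <;>
    (try split_ifs) <;> (try simp only [bStepE]) <;> (try split_ifs) <;>
    simp_all <;> omega

-- the two-smallest tracker is already saturated on a tail of larger elements
theorem foldO_saturated (rest : List Int) : ∀ (a b : Int), a ≤ b → (∀ x ∈ rest, b ≤ x) →
    rest.foldl bStepO (some a, some b) = (some a, some b) := by
  induction rest with
  | nil => intro _ _ _ _; rfl
  | cons x t ih =>
    intro a b hab hall
    have hx : b ≤ x := hall x (by simp)
    simp only [List.foldl_cons, bStepO]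
    rw [if_neg (by omega), if_neg (by omega)]
    exact ih a b hab (fun y hy => hall y (by simp [hy]))

theorem foldE_saturated (rest : List Int) : ∀ (a b : Int), b ≤ a → (∀ x ∈ rest, x ≤ b) →
    rest.foldl bStepE (some a, some b) = (some a, some b) := by
  induction rest with
  | nil => intro _ _ _ _; rfl
  | cons x t ih =>
    intro a b hab hall
    have hx : x ≤ b := hall x (by simp)
    simp only [List.foldl_cons, bStepE]
    rw [if_neg (by omega), if_neg (by omega)]
    exact ih a b hab (fun y hy => hall y (by simp [hy]))

-- on any list with ≥ 2 elements, the min tracker ends at the first two of sorted(l)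
theorem foldO_sorted (l : List Int) (a b : Int) (rest : List Int)
    (hs : PySem.List.sorted l (fun x => x) false = a :: b :: rest) :
    l.foldl bStepO ((none : Option Int), (none : Option Int)) = (some a, some b) := by
  have hperm : l.Perm (a :: b :: rest) := by
    rw [← hs]; exact (PySem.List.sorted_perm l (fun x => x) false).symm
  have hpw := PySem.List.sorted_pairwise l (fun x => x)
  rw [hs] at hpw
  simp only [List.pairwise_cons] at hpw
  have hab : a ≤ b := hpw.1 b (by simp)
  rw [@List.Perm.foldl_eq _ _ bStepO _ _ ⟨fun s x y => bStepO_comm s x y⟩ hperm]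
  simp only [List.foldl_cons, bStepO]
  rw [if_neg (by omega)]
  exact foldO_saturated rest a b hab (fun x hx => hpw.2.1 x hx)

-- on any list with ≥ 2 elements, the max tracker ends at the last two of sorted(l)
theorem foldE_sorted (l : List Int) (a b : Int) (rest : List Int)
    (hs : (PySem.List.sorted l (fun x => x) false).reverse = a :: b :: rest) :
    l.foldl bStepE ((none : Option Int), (none : Option Int)) = (some a, some b) := by
  have hperm : l.Perm (a :: b :: rest) := by
    rw [← hs]
    exact ((PySem.List.sorted_perm l (fun x => x) false).symm.trans
      (PySem.List.sorted l (fun x => x) false).reverse_perm.symm)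
  have hpw : ((PySem.List.sorted l (fun x => x) false).reverse).Pairwise (fun p q => q ≤ p) := by
    rw [List.pairwise_reverse]
    exact PySem.List.sorted_pairwise l (fun x => x)
  rw [hs] at hpw
  simp only [List.pairwise_cons] at hpw
  have hab : b ≤ a := hpw.1 b (by simp)
  rw [@List.Perm.foldl_eq _ _ bStepE _ _ ⟨fun s x y => bStepE_comm s x y⟩ hperm]
  simp only [List.foldl_cons, bStepE]
  rw [if_neg (by omega)]
  exact foldE_saturated rest a b hab (fun x hx => hpw.2.1 x hx)

-- ===== VERDICT (by name: the statement is the Claim_ definition above) =====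
theorem LargeSmallSum_spec : Claim_equal_LargeSmallSum := by
  intro arr _ hpre
  unfold Spec_LargeSmallSum LargeSmallSum LargeSmallSum_alt
  unfold Pre_LargeSmallSum at hpre
  -- A's index loop = fold over enumerate = (evensOf arr, oddsOf arr)
  have hA : (PySem.List.pyRange 0 (PySem.List.len arr) 1).foldl
      (fun (p : List Int × List Int) i =>
        if PySem.Int.mod i 2 = 0 then (p.1 ++ [PySem.List.pyGetD arr i 0], p.2)
        else (p.1, p.2 ++ [PySem.List.pyGetD arr i 0]))
      ([], []) = (evensOf arr, oddsOf arr) := by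
    have h1 : (PySem.List.enumerate arr).foldl
        (fun (p : List Int × List Int) q =>
          if PySem.Int.mod q.1 2 = 0 then (p.1 ++ [q.2], p.2) else (p.1, p.2 ++ [q.2]))
        ([], []) = (([] : List Int) ++ evensOf arr, ([] : List Int) ++ oddsOf arr) := by
      rw [foldA_enumerate arr 0 [] [] le_rfl]; norm_num
    rw [PySem.List.enumerate_eq_map_pyRange arr 0, List.foldl_map] at h1
    simpa using h1
  rw [hA]
  -- B's one pass = the two trackers over evensOf/oddsOf
  have hB := foldB_split arr true ((none : Option Int), (none : Option Int))
      ((none : Option Int), (none : Option Int))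
  simp only [if_pos] at hB
  have hlen := length_evensOf_oddsOf arr
  -- the odd-index side: two smallest
  have hol : 2 ≤ (oddsOf arr).length := by omega
  have hsl : 2 ≤ (PySem.List.sorted (oddsOf arr) (fun x => x) false).length := by
    rw [PySem.List.length_sorted]; exact hol
  obtain ⟨a, b, rest, hs⟩ : ∃ a b rest,
      PySem.List.sorted (oddsOf arr) (fun x => x) false = a :: b :: rest := by
    rcases h : PySem.List.sorted (oddsOf arr) (fun x => x) false with _ | ⟨a, _ | ⟨b, rest⟩⟩ <;>
      rw [h] at hsl <;> simp_all
  -- the even-index side: two largest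
  have hel : 2 ≤ (evensOf arr).length := by omega
  have hrl : 2 ≤ ((PySem.List.sorted (evensOf arr) (fun x => x) false).reverse).length := by
    rw [List.length_reverse, PySem.List.length_sorted]; exact hel
  obtain ⟨c, d, rest', hr⟩ : ∃ c d rest',
      (PySem.List.sorted (evensOf arr) (fun x => x) false).reverse = c :: d :: rest' := by
    rcases h : (PySem.List.sorted (evensOf arr) (fun x => x) false).reverse with _ | ⟨c, _ | ⟨d, rest'⟩⟩ <;>
      rw [h] at hrl <;> simp_all
  have hO := foldO_sorted (oddsOf arr) a b rest hs
  have hE := foldE_sorted (evensOf arr) c d rest' hr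
  have hse : PySem.List.sorted (evensOf arr) (fun x => x) false = rest'.reverse ++ [d, c] := by
    have := congrArg List.reverse hr
    simpa [List.append_assoc] using this
  simp only [hB, hO, hE, hs, hse, Option.getD_some]
  have h1 : PySem.List.pyGetD (a :: b :: rest) 1 0 = b := by
    simp [PySem.List.pyGetD, PySem.List.pyGet?, PySem.List.pyIdx?]
  have h2 : PySem.List.pyGetD (rest'.reverse ++ [d, c]) (-2) 0 = d := by
    simp [PySem.List.pyGetD, PySem.List.pyGet?, PySem.List.pyIdx?]
  rw [h1, h2]
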